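-- pv_equiv track=rewrite | github.com/romkerome/UTP-AI-Lab-Assignments | Lab_2/Greedy/Problem4.py | greedy_word_ladder
-- ===== SOURCE A (Python) =====
-- import heapq
--
-- def h(word, goal):
--     return sum(1 for a, b in zip(word, goal) if a != b)
--
-- def greedy_word_ladder(words, start, goal):
--     # Priority Queue stores: (heuristic_value, current_word)
--     pq = [(h(start, goal), start)]
--
--     # parent stores {current_word: previous_word}
--     # This also acts as our 'visited' tracker
--     parent = {start: None}
--
--     while pq:
--         # Pop the word that "looks" closest to the goal based on the heuristic
--         _, current = heapq.heappop(pq)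
--
--         if current == goal:
--             # Reconstruct the path by backtracking from goal to start
--             path = []
--             while current is not None:
--                 path.append(current)
--                 current = parent[current]
--             return path[::-1] # Reverse to get start -> goal
--
--         for neighbor in words.get(current, []):
--             if neighbor not in parent:
--                 parent[neighbor] = current
--                 priority = h(neighbor, goal)
--                 heapq.heappush(pq, (priority, neighbor))
--
--     return None
-- ===== SOURCE B (Python) =====
-- def h(word, goal):
--     return sum(1 for a, b in zip(word, goal) if a != b)
--
-- def greedy_word_ladder(words, start, goal):
--     # Frontier is a plain set of discovered-but-unexpanded words; each round we
--     # pick the word minimizing (heuristic, word), which is exactly the pop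
--     # order of a binary heap of (priority, word) tuples with unique words.
--     frontier = {start}
--     parent = {start: None}
--     while frontier:
--         current = min(frontier, key=lambda w: (h(w, goal), w))
--         frontier.remove(current)
--         if current == goal:
--             path = []
--             while current is not None:
--                 path.append(current)
--                 current = parent[current]
--             return path[::-1]
--         for neighbor in words.get(current, []):
--             if neighbor not in parent:
--                 parent[neighbor] = current
--                 frontier.add(neighbor)
--     return None
-- ===== Notes on version B (the rewrite author's own statement) =====
-- stated objective: simpler
-- what changed: Replaces the heapq priority queue with a plain set of frontier words from which each iteration removes the word minimizing the full key (h(w, goal), w), reproducing the heap's exact pop order without any heap machinery.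
import Mathlib
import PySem

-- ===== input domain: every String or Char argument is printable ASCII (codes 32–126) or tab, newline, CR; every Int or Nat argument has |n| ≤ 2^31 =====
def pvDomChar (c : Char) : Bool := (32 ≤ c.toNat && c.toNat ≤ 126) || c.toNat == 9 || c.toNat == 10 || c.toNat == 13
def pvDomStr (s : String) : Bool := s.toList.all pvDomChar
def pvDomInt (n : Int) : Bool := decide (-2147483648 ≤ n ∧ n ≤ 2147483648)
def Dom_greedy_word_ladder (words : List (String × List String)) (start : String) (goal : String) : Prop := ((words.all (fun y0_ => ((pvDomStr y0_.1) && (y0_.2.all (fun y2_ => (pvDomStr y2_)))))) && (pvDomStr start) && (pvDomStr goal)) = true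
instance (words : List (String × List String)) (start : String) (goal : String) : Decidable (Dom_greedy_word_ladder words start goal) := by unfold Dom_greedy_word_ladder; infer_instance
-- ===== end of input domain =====

-- B replaces A's heapq frontier by a plain set of words from which each round removes the
-- word minimizing (h(w,goal), w) — same pop order as the heap, no heap machinery (objective: simpler).

-- ===== PORT A =====
-- shared helper h(word, goal): number of mismatching aligned characters (both Pythons define it identically)
def pyH (word goal : String) : Int :=
  (word.toList.zip goal.toList).foldl (fun acc p => if p.1 ≠ p.2 then acc + 1 else acc) 0

-- Heap entries are Python tuples (int, str); 'Int ×ₗ String' carries exactly Python's tuple '<'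
-- (lexicographic; strings compared by code points = Lean's String '<').

-- literal CPython heapq._siftdown (the while loop as recursion on pos; heap[parentpos] is
-- always in range in every call, the 'none' arm is unreachable)
def hsiftdown (heap : List (Int ×ₗ String)) (startpos pos : Nat) (newitem : Int ×ₗ String) :
    List (Int ×ₗ String) :=
  if _h : startpos < pos then
    let parentpos := (pos - 1) / 2
    match heap[parentpos]? with
    | some parent =>
      if newitem < parent then hsiftdown (heap.set pos parent) startpos parentpos newitem
      else heap.set pos newitem
    | none => heap.set pos newitem
  else heap.set pos newitem
termination_by pos
decreasing_by omega

-- literal CPython heapq.heappush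
def hpush (heap : List (Int ×ₗ String)) (item : Int ×ₗ String) : List (Int ×ₗ String) :=
  hsiftdown (heap ++ [item]) 0 heap.length item

-- literal CPython heapq._siftup (childpos selection exactly as CPython: move to the right
-- child when 'not heap[childpos] < heap[rightpos]'; getD defaults are never used: in range)
def hsiftup (heap : List (Int ×ₗ String)) (pos : Nat) (newitem : Int ×ₗ String) :
    List (Int ×ₗ String) :=
  if hc : 2 * pos + 1 < heap.length then
    let childpos :=
      if 2 * pos + 2 < heap.length ∧
          ¬ heap.getD (2 * pos + 1) newitem < heap.getD (2 * pos + 2) newitem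
      then 2 * pos + 2 else 2 * pos + 1
    hsiftup (heap.set pos (heap.getD childpos newitem)) childpos newitem
  else hsiftdown (heap.set pos newitem) 0 pos newitem
termination_by heap.length - pos
decreasing_by simp only [List.length_set]; split <;> omega

-- literal CPython heapq.heappop: pop the last element; if the heap is still nonempty, the
-- root is returned and the last element is sifted down from the root. 'none' = IndexError
-- on an empty heap (unreachable: the loop guard checks pq first).
def hpop (heap : List (Int ×ₗ String)) : Option ((Int ×ₗ String) × List (Int ×ₗ String)) :=
  match heap.getLast? with
  | none => none
  | some lastelt =>
    match heap.dropLast with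
    | [] => some (lastelt, [])
    | r0 :: rtail => some (r0, hsiftup ((r0 :: rtail).set 0 lastelt) 0 lastelt)

-- shared helper: the path-reconstruction 'while current is not None' loop (identical in both
-- Pythons); fuel parent.size+1 always suffices (the parent chain visits distinct keys);
-- 'none' at a missing key = KeyError (unreachable: every reached word is a parent key)
def pathRec (parent : PySem.Dict String (Option String)) :
    Nat → Option String → List String → Option (List String)
  | 0, _, _ => none
  | _ + 1, none, path => some path.reverse
  | fuel + 1, some w, path =>
    match parent.get? w with
    | none => none
    | some prev => pathRec parent fuel prev (path ++ [w])

-- shared totality fuel: the loop runs at most once per pushed word, and at most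
-- 1 + Σ len(neighbor lists) words are ever pushed
def wordFuel (words : List (String × List String)) : Nat :=
  words.foldl (fun a kv => a + kv.2.length) 2

-- A's while loop over (pq, parent)
def loopA (words : List (String × List String)) (goal : String) :
    Nat → List (Int ×ₗ String) → PySem.Dict String (Option String) → Option (List String)
  | 0, _, _ => none
  | fuel + 1, pq, parent =>
    match hpop pq with
    | none => none
    | some (cur, pq1) =>
      let current := (ofLex cur).2
      if current = goal then pathRec parent (parent.size + 1) (some current) []
      else
        let st := (PySem.Dict.getD ⟨words⟩ current []).foldl
          (fun (st : List (Int ×ₗ String) × PySem.Dict String (Option String)) nb =>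
            if st.2.contains nb then st
            else (hpush st.1 (toLex (pyH nb goal, nb)), st.2.insert nb (some current)))
          (pq1, parent)
        loopA words goal fuel st.1 st.2

def greedy_word_ladder (words : List (String × List String)) (start : String) (goal : String) :
    Option (List String) :=
  loopA words goal (wordFuel words) [toLex (pyH start goal, start)]
    (PySem.Dict.empty.insert start none)

-- ===== PORT B =====
-- current = min(frontier, key=lambda w: (h(w, goal), w)): Python min keeps the first
-- minimum, and the key is injective, so a left fold with strict '<' updates is exact
def selectMin (goal : String) : List String → Option String
  | [] => none
  | w :: ws =>
    some (ws.foldl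
      (fun best x => if toLex (pyH x goal, x) < toLex (pyH best goal, best) then x else best) w)

-- B's while loop over (frontier, parent); frontier is a PySem.Set of words
def loopB (words : List (String × List String)) (goal : String) :
    Nat → PySem.Set String → PySem.Dict String (Option String) → Option (List String)
  | 0, _, _ => none
  | fuel + 1, frontier, parent =>
    match selectMin goal frontier with
    | none => none
    | some current =>
      let frontier1 := (PySem.Set.remove? frontier current).getD frontier
      if current = goal then pathRec parent (parent.size + 1) (some current) []
      else
        let st := (PySem.Dict.getD ⟨words⟩ current []).foldl
          (fun (st : PySem.Set String × PySem.Dict String (Option String)) nb =>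
            if st.2.contains nb then st
            else (PySem.Set.add st.1 nb, st.2.insert nb (some current)))
          (frontier1, parent)
        loopB words goal fuel st.1 st.2

def greedy_word_ladder_alt (words : List (String × List String)) (start : String) (goal : String) :
    Option (List String) :=
  loopB words goal (wordFuel words) [start] (PySem.Dict.empty.insert start none)

-- ===== PRECONDITION & SPEC =====
def Spec_greedy_word_ladder (words : List (String × List String)) (start : String) (goal : String) (out : Option (List String)) : Prop := out = greedy_word_ladder_alt words start goal
instance (words : List (String × List String)) (start : String) (goal : String) (out : Option (List String)) : Decidable (Spec_greedy_word_ladder words start goal out) := by unfold Spec_greedy_word_ladder; infer_instance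

-- ===== CLAIM (what is proved, stated in full; the proofs are below) =====
def Claim_equal_greedy_word_ladder : Prop := ∀ (words : List (String × List String)) (start : String) (goal : String), Dom_greedy_word_ladder words start goal → Spec_greedy_word_ladder words start goal (greedy_word_ladder words start goal)

-- ===== LEMMAS AND PROOFS =====

-- the key under which A stores a word in the heap
def keyF (goal w : String) : Int ×ₗ String := toLex (pyH w goal, w)

lemma keyF_inj (goal : String) : Function.Injective (keyF goal) := by
  intro a b h
  have := congrArg (fun p => (ofLex p).2) h
  simpa [keyF] using this

-- binary min-heap property on the array representation
def IsHeap (l : List (Int ×ₗ String)) : Prop :=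
  ∀ i j (hi : i < l.length) (hj : j < l.length), (j = 2*i+1 ∨ j = 2*i+2) → l[i] ≤ l[j]

-- heap-with-a-hole invariants for the sift procedures
def HoleA (l : List (Int ×ₗ String)) (pos : Nat) : Prop :=
  ∀ i j (hi : i < l.length) (hj : j < l.length),
    (j = 2*i+1 ∨ j = 2*i+2) → i ≠ pos → j ≠ pos → l[i] ≤ l[j]

def HoleB (l : List (Int ×ₗ String)) (pos : Nat) (x : Int ×ₗ String) : Prop :=
  ∀ j (hj : j < l.length), (j = 2*pos+1 ∨ j = 2*pos+2) → x ≤ l[j]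

def HoleC (l : List (Int ×ₗ String)) (pos : Nat) : Prop :=
  pos ≠ 0 → ∀ j (hj : j < l.length) (hp : (pos-1)/2 < l.length),
    (j = 2*pos+1 ∨ j = 2*pos+2) → l[(pos-1)/2] ≤ l[j]

lemma count_set_add {α : Type} [DecidableEq α] (l : List α) (i : Nat) (a y : α) (h : i < l.length) :
    (l.set i a).count y + (if l[i] = y then 1 else 0) = l.count y + (if a = y then 1 else 0) := by
  have hd : l.set i a = l.take i ++ a :: l.drop (i+1) := by
    simp [List.set_eq_take_append_cons_drop, h]
  have hl : l.count y = (l.take i ++ l[i] :: l.drop (i+1)).count y := by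
    conv_lhs => rw [← List.take_append_drop i l, List.drop_eq_getElem_cons h]
  rw [hd, hl]
  simp only [List.count_append, List.count_cons, beq_iff_eq]
  split <;> split <;> omega

lemma swap_perm {α : Type} [DecidableEq α] (l : List α) (i j : Nat) (hi : i < l.length) (hj : j < l.length) :
    ((l.set i (l[j])).set j (l[i])).Perm l := by
  rcases eq_or_ne i j with rfl | hij
  · simp [List.set_getElem_self]
  · rw [List.perm_iff_count]
    intro y
    have hj' : j < (l.set i (l[j])).length := by simpa using hj
    have c1 := count_set_add l i (l[j]) y hi
    have c2 := count_set_add (l.set i (l[j])) j (l[i]) y hj'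
    rw [List.getElem_set_ne (by omega)] at c2
    omega

lemma set_set_perm {α : Type} [DecidableEq α] (l : List α) (i j : Nat) (x : α)
    (hi : i < l.length) (hj : j < l.length) (hij : i ≠ j) :
    ((l.set i (l[j])).set j x).Perm (l.set i x) := by
  have hBj : (l.set i x)[j]'(by simpa using hj) = l[j] := by
    simp [hij]
  have hBi : (l.set i x)[i]'(by simpa using hi) = x := by
    simp
  have : ((l.set i x).set i ((l.set i x)[j]'(by simpa using hj))).set j ((l.set i x)[i]'(by simpa using hi)) = (l.set i (l[j])).set j x := by
    rw [hBj, hBi, List.set_set]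
  have h2 := swap_perm (l.set i x) i j (by simpa using hi) (by simpa using hj)
  rw [this] at h2
  exact h2

lemma siftdown_core : ∀ (pos : Nat) (l : List (Int ×ₗ String)) (x : Int ×ₗ String),
    pos < l.length → HoleA l pos → HoleB l pos x → HoleC l pos →
    IsHeap (hsiftdown l 0 pos x) ∧ (hsiftdown l 0 pos x).Perm (l.set pos x) := by
  intro pos
  induction pos using Nat.strong_induction_on with
  | _ pos IH =>
    intro l x hpos hA hB hC
    rcases Nat.eq_zero_or_pos pos with rfl | hpos0
    · rw [hsiftdown]
      simp only [Nat.lt_irrefl, dite_false]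
      refine ⟨?_, List.Perm.refl _⟩
      intro i j hi hj hedge
      simp only [List.length_set] at hi hj
      by_cases hip : i = 0
      · simp only [List.getElem_set, if_pos (show 0 = i by omega), if_neg (show ¬ (0 = j) by omega)]
        exact hB j hj (by omega)
      · simp only [List.getElem_set, if_neg (show ¬ (0 = i) by omega), if_neg (show ¬ (0 = j) by omega)]
        exact hA i j hi hj hedge (by omega) (by omega)
    · have hpp : (pos - 1) / 2 < l.length := by omega
      have hppos : (pos - 1) / 2 < pos := by omega
      rw [hsiftdown]
      simp only [dif_pos hpos0]
      rw [List.getElem?_eq_getElem hpp]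
      simp only
      by_cases hlt : x < l[(pos-1)/2]
      · rw [if_pos hlt]
        have hA2 : HoleA (l.set pos (l[(pos-1)/2])) ((pos-1)/2) := by
          intro i j hi hj hedge hine hjne
          simp only [List.length_set] at hi hj
          by_cases hip : i = pos
          · simp only [List.getElem_set, if_pos (show pos = i by omega), if_neg (show ¬ (pos = j) by omega)]
            exact hC (by omega) j hj hpp (by omega)
          · by_cases hjp : j = pos
            · exact absurd (show i = (pos-1)/2 by omega) hine
            · simp only [List.getElem_set, if_neg (show ¬ (pos = i) by omega), if_neg (show ¬ (pos = j) by omega)]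
              exact hA i j hi hj hedge hip hjp
        have hB2 : HoleB (l.set pos (l[(pos-1)/2])) ((pos-1)/2) x := by
          intro j hj hedge
          simp only [List.length_set] at hj
          by_cases hjp : j = pos
          · simp only [List.getElem_set, if_pos (show pos = j by omega)]
            exact le_of_lt hlt
          · simp only [List.getElem_set, if_neg (show ¬ (pos = j) by omega)]
            have h2 : l[(pos-1)/2] ≤ l[j] := hA ((pos-1)/2) j hpp hj (by omega) (by omega) hjp
            exact le_trans (le_of_lt hlt) h2
        have hC2 : HoleC (l.set pos (l[(pos-1)/2])) ((pos-1)/2) := by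
          intro hne0 j hj hgp hedge
          simp only [List.length_set] at hj hgp
          have hplt : (pos-1)/2 = 2*(((pos-1)/2-1)/2)+1 ∨ (pos-1)/2 = 2*(((pos-1)/2-1)/2)+2 := by omega
          have hgpp : l[((pos-1)/2-1)/2] ≤ l[(pos-1)/2] :=
            hA (((pos-1)/2-1)/2) ((pos-1)/2) (by omega) hpp hplt (by omega) (by omega)
          by_cases hjp : j = pos
          · simp only [List.getElem_set, if_pos (show pos = j by omega),
              if_neg (show ¬ (pos = ((pos-1)/2-1)/2) by omega)]
            exact hgpp
          · simp only [List.getElem_set, if_neg (show ¬ (pos = j) by omega),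
              if_neg (show ¬ (pos = ((pos-1)/2-1)/2) by omega)]
            have h2 : l[(pos-1)/2] ≤ l[j] := hA ((pos-1)/2) j hpp hj (by omega) (by omega) hjp
            exact le_trans hgpp h2
        obtain ⟨h1, h2⟩ := IH ((pos-1)/2) hppos (l.set pos (l[(pos-1)/2])) x (by simpa using hpp) hA2 hB2 hC2
        refine ⟨h1, ?_⟩
        have h3 : ((l.set pos (l[(pos-1)/2])).set ((pos-1)/2) x).Perm (l.set pos x) :=
          set_set_perm l pos ((pos-1)/2) x hpos hpp (by omega)
        exact h2.trans h3
      · rw [if_neg hlt]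
        refine ⟨?_, List.Perm.refl _⟩
        intro i j hi hj hedge
        simp only [List.length_set] at hi hj
        by_cases hip : i = pos
        · simp only [List.getElem_set, if_pos (show pos = i by omega), if_neg (show ¬ (pos = j) by omega)]
          exact hB j hj (by omega)
        · by_cases hjp : j = pos
          · simp only [List.getElem_set, if_neg (show ¬ (pos = i) by omega), if_pos (show pos = j by omega)]
            have hieq : i = (pos-1)/2 := by omega
            simpa [hieq] using le_of_not_gt hlt
          · simp only [List.getElem_set, if_neg (show ¬ (pos = i) by omega), if_neg (show ¬ (pos = j) by omega)]
            exact hA i j hi hj hedge hip hjp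

lemma siftup_step (l : List (Int ×ₗ String)) (pos c : Nat)
    (_hpos : pos < l.length) (hc : c < l.length) (hcc : c = 2*pos+1 ∨ c = 2*pos+2)
    (mc : ∀ j (hj : j < l.length), (j = 2*pos+1 ∨ j = 2*pos+2) → l[c] ≤ l[j])
    (hA : HoleA l pos) (hC : HoleC l pos) :
    HoleA (l.set pos (l[c])) c ∧ HoleC (l.set pos (l[c])) c := by
  constructor
  · intro i j hi hj hedge hine hjne
    simp only [List.length_set] at hi hj
    by_cases hip : i = pos
    · simp only [List.getElem_set, if_pos (show pos = i by omega), if_neg (show ¬ (pos = j) by omega)]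
      exact mc j hj (by omega)
    · by_cases hjp : j = pos
      · simp only [List.getElem_set, if_neg (show ¬ (pos = i) by omega), if_pos (show pos = j by omega)]
        have hieq : i = (pos-1)/2 := by omega
        have := hC (by omega) c hc (by omega) hcc
        simpa [hieq] using this
      · simp only [List.getElem_set, if_neg (show ¬ (pos = i) by omega), if_neg (show ¬ (pos = j) by omega)]
        exact hA i j hi hj hedge hip hjp
  · intro hne0 j hj hgp hedge
    simp only [List.length_set] at hj hgp
    simp only [List.getElem_set, if_pos (show pos = (c-1)/2 by omega), if_neg (show ¬ (pos = j) by omega)]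
    exact hA c j hc hj (by omega) (by omega) (by omega)

lemma siftup_core : ∀ (k pos : Nat) (l : List (Int ×ₗ String)) (x : Int ×ₗ String),
    l.length - pos ≤ k → pos < l.length → HoleA l pos → HoleC l pos →
    IsHeap (hsiftup l pos x) ∧ (hsiftup l pos x).Perm (l.set pos x) := by
  intro k
  induction k with
  | zero => intro pos l x hk hpos _ _; omega
  | succ k IH =>
    intro pos l x hk hpos hA hC
    rw [hsiftup]
    by_cases hc1 : 2 * pos + 1 < l.length
    · rw [dif_pos hc1]
      by_cases hcond : 2 * pos + 2 < l.length ∧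
          ¬ (l.getD (2*pos+1) x) < (l.getD (2*pos+2) x)
      · have hc2 : 2 * pos + 2 < l.length := hcond.1
        have hgd1 : l.getD (2*pos+1) x = l[2*pos+1] := List.getD_eq_getElem l x hc1
        have hgd2 : l.getD (2*pos+2) x = l[2*pos+2] := List.getD_eq_getElem l x hc2
        rw [if_pos hcond]
        show IsHeap (hsiftup (l.set pos (l.getD (2*pos+2) x)) (2*pos+2) x) ∧
          (hsiftup (l.set pos (l.getD (2*pos+2) x)) (2*pos+2) x).Perm (l.set pos x)
        rw [hgd2]
        rw [hgd1, hgd2] at hcond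
        have mc : ∀ j (hj : j < l.length), (j = 2*pos+1 ∨ j = 2*pos+2) → l[2*pos+2] ≤ l[j] := by
          intro j hj hedge
          have hle : l[2*pos+2] ≤ l[2*pos+1] := le_of_not_gt hcond.2
          rcases hedge with h | h
          · simpa [h] using hle
          · simp [h]
        obtain ⟨hA2, hC2⟩ := siftup_step l pos (2*pos+2) hpos hc2 (by omega) mc hA hC
        obtain ⟨h1, h2⟩ := IH (2*pos+2) (l.set pos (l[2*pos+2])) x (by simp; omega) (by simp; omega) hA2 hC2
        exact ⟨h1, h2.trans (set_set_perm l pos (2*pos+2) x hpos hc2 (by omega))⟩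
      · have hgd1 : l.getD (2*pos+1) x = l[2*pos+1] := List.getD_eq_getElem l x hc1
        rw [if_neg hcond]
        show IsHeap (hsiftup (l.set pos (l.getD (2*pos+1) x)) (2*pos+1) x) ∧
          (hsiftup (l.set pos (l.getD (2*pos+1) x)) (2*pos+1) x).Perm (l.set pos x)
        rw [hgd1]
        have mc : ∀ j (hj : j < l.length), (j = 2*pos+1 ∨ j = 2*pos+2) → l[2*pos+1] ≤ l[j] := by
          intro j hj hedge
          rcases hedge with h | h
          · simp [h]
          · have hc2 : 2 * pos + 2 < l.length := by omega
            have hgd2 : l.getD (2*pos+2) x = l[2*pos+2] := List.getD_eq_getElem l x hc2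
            have hlt : l.getD (2*pos+1) x < l.getD (2*pos+2) x := by
              by_contra hnot
              exact hcond ⟨hc2, hnot⟩
            rw [hgd1, hgd2] at hlt
            simpa [h] using le_of_lt hlt
        obtain ⟨hA2, hC2⟩ := siftup_step l pos (2*pos+1) hpos hc1 (by omega) mc hA hC
        obtain ⟨h1, h2⟩ := IH (2*pos+1) (l.set pos (l[2*pos+1])) x (by simp; omega) (by simp; omega) hA2 hC2
        exact ⟨h1, h2.trans (set_set_perm l pos (2*pos+1) x hpos hc1 (by omega))⟩
    · rw [dif_neg hc1]
      have hA2 : HoleA (l.set pos x) pos := by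
        intro i j hi hj hedge hine hjne
        simp only [List.length_set] at hi hj
        simp only [List.getElem_set, if_neg (show ¬ (pos = i) by omega), if_neg (show ¬ (pos = j) by omega)]
        exact hA i j hi hj hedge hine hjne
      have hB2 : HoleB (l.set pos x) pos x := by
        intro j hj hedge
        simp only [List.length_set] at hj
        omega
      have hC2 : HoleC (l.set pos x) pos := by
        intro hne0 j hj hgp hedge
        simp only [List.length_set] at hj
        omega
      obtain ⟨h1, h2⟩ := siftdown_core pos (l.set pos x) x (by simpa using hpos) hA2 hB2 hC2
      refine ⟨h1, ?_⟩
      rw [List.set_set] at h2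
      simpa using h2

lemma set_append_len {α : Type} (l : List α) (x y : α) : (l ++ [x]).set l.length y = l ++ [y] := by
  rw [List.set_append_right _ _ (Nat.le_refl _)]
  simp

lemma hpush_spec (l : List (Int ×ₗ String)) (x : Int ×ₗ String) (hl : IsHeap l) :
    IsHeap (hpush l x) ∧ (hpush l x).Perm (x :: l) := by
  have hlen : l.length < (l ++ [x]).length := by simp
  obtain ⟨h1, h2⟩ := siftdown_core l.length (l ++ [x]) x hlen
    (by
      intro i j hi hj hedge hine hjne
      simp only [List.length_append, List.length_cons, List.length_nil] at hi hj
      have hi' : i < l.length := by omega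
      have hj' : j < l.length := by omega
      rw [List.getElem_append_left hi', List.getElem_append_left hj']
      exact hl i j hi' hj' hedge)
    (by intro j hj hedge; simp at hj; omega)
    (by intro h0 j hj hp hedge; simp at hj; omega)
  rw [set_append_len] at h2
  exact ⟨h1, h2.trans (List.perm_append_singleton x l)⟩

lemma root_min (l : List (Int ×ₗ String)) (hl : IsHeap l) :
    ∀ j (hj : j < l.length) (h0 : 0 < l.length), l[0] ≤ l[j] := by
  intro j
  induction j using Nat.strong_induction_on with
  | _ j IHj =>
    intro hj h0
    rcases Nat.eq_zero_or_pos j with rfl | hjp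
    · exact le_refl _
    · have hedge2 : j = 2*((j-1)/2)+1 ∨ j = 2*((j-1)/2)+2 := by omega
      have h1 : l[(j-1)/2] ≤ l[j] := hl ((j-1)/2) j (by omega) hj hedge2
      exact le_trans (IHj ((j-1)/2) (by omega) (by omega) h0) h1

lemma hpop_spec (l : List (Int ×ₗ String)) (hl : IsHeap l) (hne : l ≠ []) :
    ∃ m l', hpop l = some (m, l') ∧ IsHeap l' ∧ l.Perm (m :: l') ∧ ∀ y ∈ l, m ≤ y := by
  have h0 : 0 < l.length := List.length_pos_iff.mpr hne
  have hmin : ∀ y ∈ l, l[0] ≤ y := by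
    intro y hy
    obtain ⟨i, hi, rfl⟩ := List.mem_iff_getElem.mp hy
    exact root_min l hl i hi h0
  have hlast : l.getLast? = some (l.getLast hne) := List.getLast?_eq_some_getLast hne
  rcases hdrop : l.dropLast with _ | ⟨r0, rtail⟩
  · -- single element
    have hlen1 : l.length = 1 := by
      have := congrArg List.length hdrop
      simp [List.length_dropLast] at this
      omega
    obtain ⟨a, rfl⟩ : ∃ a, l = [a] := by
      rcases l with _ | ⟨a, t⟩
      · exact absurd rfl hne
      · simp at hlen1; simp [hlen1]
    refine ⟨a, [], ?_, ?_, ?_, ?_⟩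
    · simp [hpop, hdrop]
    · intro i j hi hj hedge; simp at hj
    · exact List.Perm.refl _
    · simp
  · -- at least two elements
    have hdl : l.dropLast ++ [l.getLast hne] = l := List.dropLast_append_getLast hne
    have hL2 : 2 ≤ l.length := by
      have := congrArg List.length hdrop
      simp [List.length_dropLast] at this
      omega
    have hr0 : r0 = l[0]'(by omega) := by
      have h1 : l.dropLast[0]'(by rw [hdrop]; simp) = l[0]'(by omega) :=
        List.getElem_dropLast _
      have h2 : l.dropLast[0]'(by rw [hdrop]; simp) = (r0 :: rtail)[0]'(by simp) :=
        List.getElem_of_eq hdrop _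
      simp at h2
      exact h2.symm
    set lastelt := l.getLast hne with hlastdef
    set l2 : List (Int ×ₗ String) := (r0 :: rtail).set 0 lastelt with hl2
    have hl2len : l2.length = l.length - 1 := by
      have := congrArg List.length hdrop
      simp [List.length_dropLast] at this
      simp [hl2]; omega
    have hl2get : ∀ i (hi : i < l2.length), i ≠ 0 → l2[i] = l[i]'(by omega) := by
      intro i hi hine
      have hia : i < (r0 :: rtail).length := by simpa [hl2] using hi
      have e1 : l2[i] = (r0 :: rtail)[i]'hia := by
        simp only [hl2, List.getElem_set, if_neg (show ¬ (0 = i) by omega)]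
      have hib : i < l.dropLast.length := by rw [hdrop]; exact hia
      have e2 : l.dropLast[i]'hib = (r0 :: rtail)[i]'hia := List.getElem_of_eq hdrop _
      have e3 : l.dropLast[i]'hib = l[i]'(by omega) := List.getElem_dropLast _
      exact e1.trans (e2.symm.trans e3)
    obtain ⟨h1, h2⟩ := siftup_core l2.length 0 l2 lastelt (by omega) (by rw [hl2len]; omega)
      (by
        intro i j hi hj hedge hine hjne
        rw [hl2get i hi hine, hl2get j hj hjne]
        exact hl i j (by omega) (by omega) hedge)
      (by intro hcontra; omega)
    refine ⟨r0, hsiftup l2 0 lastelt, ?_, h1, ?_, by rw [hr0]; exact hmin⟩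
    · simp only [hpop, hlast, hdrop]
      rfl
    · -- l ~ r0 :: result
      have e3 : l2.set 0 lastelt = lastelt :: rtail := by simp [hl2]
      rw [e3] at h2
      have he : l = r0 :: (rtail ++ [lastelt]) := by
        conv_lhs => rw [← hdl, hdrop]
        rfl
      rw [he]
      exact List.Perm.cons r0 ((List.perm_append_singleton lastelt rtail).trans h2.symm)

lemma selectMin_fold (goal : String) : ∀ (ws : List String) (b : String),
    (ws.foldl (fun best x =>
        if toLex (pyH x goal, x) < toLex (pyH best goal, best) then x else best) b) ∈ b :: ws ∧
    ∀ w ∈ b :: ws,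
      keyF goal (ws.foldl (fun best x =>
        if toLex (pyH x goal, x) < toLex (pyH best goal, best) then x else best) b) ≤ keyF goal w := by
  intro ws
  induction ws with
  | nil =>
    intro b
    refine ⟨by simp, ?_⟩
    intro w hw
    simp at hw
    subst hw
    exact le_refl _
  | cons a t IH =>
    intro b
    simp only [List.foldl_cons]
    obtain ⟨h1, h2⟩ := IH (if toLex (pyH a goal, a) < toLex (pyH b goal, b) then a else b)
    have hb2 : (if toLex (pyH a goal, a) < toLex (pyH b goal, b) then a else b) = a ∨
        (if toLex (pyH a goal, a) < toLex (pyH b goal, b) then a else b) = b := by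
      split
      · exact Or.inl rfl
      · exact Or.inr rfl
    constructor
    · rcases List.mem_cons.mp h1 with h | h
      · rcases hb2 with hb | hb <;> rw [h, hb] <;> simp
      · simp [h]
    · intro w hw
      rcases List.mem_cons.mp hw with rfl | hw'
      · -- w = b
        have hstep : keyF goal (if toLex (pyH a goal, a) < toLex (pyH w goal, w) then a else w)
            ≤ keyF goal w := by
          split
          · next hlt => exact le_of_lt hlt
          · exact le_refl _
        exact le_trans (h2 _ List.mem_cons_self) hstep
      · rcases List.mem_cons.mp hw' with rfl | hw'' 
        · -- w = a
          have hstep : keyF goal (if toLex (pyH w goal, w) < toLex (pyH b goal, b) then w else b)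
              ≤ keyF goal w := by
            split
            · exact le_refl _
            · next hnlt => exact le_of_not_gt hnlt
          exact le_trans (h2 _ List.mem_cons_self) hstep
        · exact h2 w (List.mem_cons_of_mem _ hw'')

lemma selectMin_spec (goal : String) (f0 : String) (fs : List String) :
    ∃ c, selectMin goal (f0 :: fs) = some c ∧ c ∈ f0 :: fs ∧
      ∀ w ∈ f0 :: fs, keyF goal c ≤ keyF goal w := by
  obtain ⟨h1, h2⟩ := selectMin_fold goal fs f0
  exact ⟨_, rfl, h1, h2⟩

-- one invariant-preserving step equality for the neighbor-expansion fold
lemma fold_eq (goal current : String) (nbrs : List String) :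
    ∀ (pq : List (Int ×ₗ String)) (f : PySem.Set String)
      (parent : PySem.Dict String (Option String)),
    IsHeap pq → pq.Perm (f.map (keyF goal)) → f.Nodup →
    (∀ w ∈ f, parent.contains w = true) →
    (nbrs.foldl
        (fun (st : List (Int ×ₗ String) × PySem.Dict String (Option String)) nb =>
          if st.2.contains nb then st
          else (hpush st.1 (toLex (pyH nb goal, nb)), st.2.insert nb (some current)))
        (pq, parent)).2 =
      (nbrs.foldl
        (fun (st : PySem.Set String × PySem.Dict String (Option String)) nb =>
          if st.2.contains nb then st
          else (PySem.Set.add st.1 nb, st.2.insert nb (some current)))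
        (f, parent)).2 ∧
    IsHeap (nbrs.foldl
        (fun (st : List (Int ×ₗ String) × PySem.Dict String (Option String)) nb =>
          if st.2.contains nb then st
          else (hpush st.1 (toLex (pyH nb goal, nb)), st.2.insert nb (some current)))
        (pq, parent)).1 ∧
    ((nbrs.foldl
        (fun (st : List (Int ×ₗ String) × PySem.Dict String (Option String)) nb =>
          if st.2.contains nb then st
          else (hpush st.1 (toLex (pyH nb goal, nb)), st.2.insert nb (some current)))
        (pq, parent)).1).Perm
      (((nbrs.foldl
        (fun (st : PySem.Set String × PySem.Dict String (Option String)) nb =>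
          if st.2.contains nb then st
          else (PySem.Set.add st.1 nb, st.2.insert nb (some current)))
        (f, parent)).1).map (keyF goal)) ∧
    ((nbrs.foldl
        (fun (st : PySem.Set String × PySem.Dict String (Option String)) nb =>
          if st.2.contains nb then st
          else (PySem.Set.add st.1 nb, st.2.insert nb (some current)))
        (f, parent)).1).Nodup ∧
    (∀ w ∈ (nbrs.foldl
        (fun (st : PySem.Set String × PySem.Dict String (Option String)) nb =>
          if st.2.contains nb then st
          else (PySem.Set.add st.1 nb, st.2.insert nb (some current)))
        (f, parent)).1,
      ((nbrs.foldl
        (fun (st : PySem.Set String × PySem.Dict String (Option String)) nb =>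
          if st.2.contains nb then st
          else (PySem.Set.add st.1 nb, st.2.insert nb (some current)))
        (f, parent)).2).contains w = true) := by
  induction nbrs with
  | nil =>
    intro pq f parent hH hP hN hK
    exact ⟨rfl, hH, hP, hN, hK⟩
  | cons nb rest IH =>
    intro pq f parent hH hP hN hK
    simp only [List.foldl_cons]
    by_cases hc : parent.contains nb = true
    · simp only [hc, if_true]
      exact IH pq f parent hH hP hN hK
    · simp only [hc, if_false, Bool.false_eq_true]
      have hnb_notin : nb ∉ f := fun hm => hc (hK nb hm)
      have hadd : PySem.Set.add f nb = f ++ [nb] := PySem.Set.add_of_not_mem hnb_notin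
      obtain ⟨hH2, hperm⟩ := hpush_spec pq (toLex (pyH nb goal, nb)) hH
      have hP2 : (hpush pq (toLex (pyH nb goal, nb))).Perm
          ((PySem.Set.add f nb).map (keyF goal)) := by
        rw [hadd, List.map_append]
        exact hperm.trans ((hP.cons _).trans
          (List.perm_append_singleton (keyF goal nb) (f.map (keyF goal))).symm)
      have hN2 : (PySem.Set.add f nb).Nodup := by
        rw [hadd]
        rw [List.nodup_append]
        refine ⟨hN, by simp, ?_⟩
        intro a ha b hb heq
        have hbnb : b = nb := by simpa using hb
        exact hnb_notin ((heq.trans hbnb) ▸ ha)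
      have hK2 : ∀ w ∈ PySem.Set.add f nb, (parent.insert nb (some current)).contains w = true := by
        intro w hw
        rw [hadd] at hw
        rw [PySem.Dict.contains_insert]
        rcases List.mem_append.mp hw with h | h
        · simp [hK w h]
        · simp at h
          simp [h]
      exact IH _ _ _ hH2 hP2 hN2 hK2

lemma loop_eq (words : List (String × List String)) (goal : String) :
    ∀ (fuel : Nat) (pq : List (Int ×ₗ String)) (f : PySem.Set String)
      (parent : PySem.Dict String (Option String)),
    IsHeap pq → pq.Perm (f.map (keyF goal)) → f.Nodup →
    (∀ w ∈ f, parent.contains w = true) →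
    loopA words goal fuel pq parent = loopB words goal fuel f parent := by
  intro fuel
  induction fuel with
  | zero => intro pq f parent _ _ _ _; rfl
  | succ fuel IH =>
    intro pq f parent hH hP hN hK
    cases f with
    | nil =>
      have hpq : pq = [] := by
        have := hP
        simp at this
        exact this
      subst hpq
      rfl
    | cons f0 fs =>
      have hne : pq ≠ [] := by
        intro h
        subst h
        have := hP.symm.length_eq
        simp at this
      obtain ⟨m, pq', hpopEq, hH', hPerm', hMin⟩ := hpop_spec pq hH hne
      obtain ⟨c, hselEq, hcmem, hcle⟩ := selectMin_spec goal f0 fs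
      have hkc_mem : keyF goal c ∈ (f0 :: fs).map (keyF goal) := List.mem_map_of_mem hcmem
      have hkeq : m = keyF goal c := by
        have hm_mem : m ∈ pq := hPerm'.mem_iff.mpr List.mem_cons_self
        obtain ⟨wm, hwm_mem, hwm_eq⟩ := List.mem_map.mp (hP.subset hm_mem)
        have h1 : keyF goal c ≤ m := hwm_eq ▸ hcle wm hwm_mem
        have h2 : m ≤ keyF goal c := hMin _ (hP.symm.subset hkc_mem)
        exact le_antisymm h2 h1
      have hcurr : (ofLex m).2 = c := by rw [hkeq]; rfl
      -- the B frontier after remove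
      have hrem : (PySem.Set.remove? (f0 :: fs) c).getD (f0 :: fs) =
          PySem.Set.discard (f0 :: fs) c := by
        rw [PySem.Set.remove?_of_mem hcmem]
        rfl
      -- discard = erase up to permutation (both are nodup with the same members)
      have hdisc_perm : (PySem.Set.discard (f0 :: fs) c).Perm ((f0 :: fs).erase c) := by
        apply (List.perm_ext_iff_of_nodup (PySem.Set.nodup_discard _ c hN) (hN.erase c)).mpr
        intro x
        rw [PySem.Set.mem_discard, List.Nodup.mem_erase_iff hN]
        tauto
      have hP2 : pq'.Perm ((PySem.Set.discard (f0 :: fs) c).map (keyF goal)) := by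
        have h3 : ((f0 :: fs).map (keyF goal)).Perm
            (m :: ((f0 :: fs).map (keyF goal)).erase m) :=
          List.perm_cons_erase (hkeq ▸ hkc_mem)
        have h4 : (m :: pq').Perm (m :: ((f0 :: fs).map (keyF goal)).erase m) :=
          (hPerm'.symm.trans hP).trans h3
        have h5 : pq'.Perm (((f0 :: fs).map (keyF goal)).erase m) := h4.cons_inv
        have h6 : ((f0 :: fs).erase c).map (keyF goal) =
            ((f0 :: fs).map (keyF goal)).erase (keyF goal c) :=
          List.map_erase (keyF_inj goal) _
        exact h5.trans (by rw [hkeq, ← h6]; exact (hdisc_perm.map _).symm)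
      have hN2 : (PySem.Set.discard (f0 :: fs) c).Nodup := PySem.Set.nodup_discard _ c hN
      have hK2 : ∀ w ∈ PySem.Set.discard (f0 :: fs) c, parent.contains w = true := by
        intro w hw
        exact hK w ((PySem.Set.mem_discard _ _ _).mp hw).1
      show loopA words goal (fuel + 1) pq parent = loopB words goal (fuel + 1) (f0 :: fs) parent
      rw [loopA, loopB, hpopEq, hselEq]
      simp only [hcurr, hrem]
      by_cases hgoal : c = goal
      · simp only [if_pos hgoal]
      · simp only [if_neg hgoal]
        obtain ⟨e2, hH3, hP3, hN3, hK3⟩ :=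
          fold_eq goal c (PySem.Dict.getD ⟨words⟩ c []) pq' (PySem.Set.discard (f0 :: fs) c)
            parent hH' hP2 hN2 hK2
        rw [e2]
        exact IH _ _ _ hH3 hP3 hN3 hK3

-- ===== VERDICT (by name: the statement is the Claim_ definition above) =====
theorem greedy_word_ladder_spec : Claim_equal_greedy_word_ladder := by
  intro words start goal _
  unfold Spec_greedy_word_ladder greedy_word_ladder greedy_word_ladder_alt
  apply loop_eq
  · intro i j hi hj hedge; simp at hj; omega
  · simp [keyF]
  · simp
  · intro w hw; simp at hw; subst hw
    exact PySem.Dict.contains_insert_self _ _ _
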